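-- pv_equiv track=rewrite | github.com/MAMi1903x/Bakim-Paketi-Olusturma | deneme1.py | find_best_columns
-- ===== SOURCE A (Python) =====
-- def normalize_colname(c) -> str:
--     return str(c).strip().upper() if c is not None else ""
--
-- def find_best_columns(df_cols):
--     desc_col = next((c for c in df_cols if "DESC" in normalize_colname(c)), None)
--     mh_col = next((c for c in df_cols if "MH" in normalize_colname(c)), None)
--
--     ref_col = next((c for c in df_cols if ("W/O" in normalize_colname(c) and "REFER" in normalize_colname(c))), None)
--     if ref_col is None:
--         ref_col = next((c for c in df_cols if "REFER" in normalize_colname(c)), None)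
--     if ref_col is None:
--         ref_col = next((c for c in df_cols if ("W/O" in normalize_colname(c) or "WO" in normalize_colname(c))), None)
--
--     return desc_col, mh_col, ref_col
-- ===== SOURCE B (Python) =====
-- def normalize_colname(c) -> str:
--     return str(c).strip().upper() if c is not None else ""
--
-- def find_best_columns(df_cols):
--     desc = mh = ref_both = ref_refer = ref_wo = None
--     for c in df_cols:
--         n = normalize_colname(c)
--         if desc is None and "DESC" in n:
--             desc = c
--         if mh is None and "MH" in n:
--             mh = c
--         if ref_both is None and "W/O" in n and "REFER" in n:
--             ref_both = c
--         if ref_refer is None and "REFER" in n: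
--             ref_refer = c
--         if ref_wo is None and ("W/O" in n or "WO" in n):
--             ref_wo = c
--     ref = ref_both if ref_both is not None else (ref_refer if ref_refer is not None else ref_wo)
--     return desc, mh, ref
-- ===== Notes on version B (the rewrite author's own statement) =====
-- stated objective: faster
-- what changed: Replaced five separate scans of df_cols (each renormalizing every column name) with a single pass that normalizes each name once and maintains five first-seen slots, resolving the ref priority after the loop.
import Mathlib
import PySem

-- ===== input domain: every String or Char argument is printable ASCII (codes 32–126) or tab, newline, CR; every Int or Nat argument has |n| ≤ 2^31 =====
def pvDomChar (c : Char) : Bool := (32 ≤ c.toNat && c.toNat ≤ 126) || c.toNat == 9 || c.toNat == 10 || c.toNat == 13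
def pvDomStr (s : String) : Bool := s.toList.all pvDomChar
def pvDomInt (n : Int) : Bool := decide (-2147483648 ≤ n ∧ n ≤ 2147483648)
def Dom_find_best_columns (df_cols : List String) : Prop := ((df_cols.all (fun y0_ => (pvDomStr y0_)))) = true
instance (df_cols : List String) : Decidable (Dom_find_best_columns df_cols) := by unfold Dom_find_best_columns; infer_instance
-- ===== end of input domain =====

-- B makes one pass over df_cols, normalizing each name once and keeping five first-seen slots,
-- instead of A's five independent scans; return value is identical (objective: faster, constant factor).

-- ===== PORT A =====
-- normalize_colname: inputs are strings (never None), so the str(c).strip().upper() branch applies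
def normalize_colname (c : String) : String := PySem.Str.upper (PySem.Str.strip c)

def find_best_columns (df_cols : List String) : Option String × Option String × Option String :=
  let desc_col := df_cols.find? (fun c => PySem.Str.isIn "DESC" (normalize_colname c))
  let mh_col := df_cols.find? (fun c => PySem.Str.isIn "MH" (normalize_colname c))
  let ref_col := df_cols.find? (fun c => PySem.Str.isIn "W/O" (normalize_colname c) && PySem.Str.isIn "REFER" (normalize_colname c))
  let ref_col := match ref_col with
    | none => df_cols.find? (fun c => PySem.Str.isIn "REFER" (normalize_colname c))
    | some x => some x
  let ref_col := match ref_col with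
    | none => df_cols.find? (fun c => PySem.Str.isIn "W/O" (normalize_colname c) || PySem.Str.isIn "WO" (normalize_colname c))
    | some x => some x
  (desc_col, mh_col, ref_col)

-- ===== PORT B =====
-- first-seen slot update: set only while still none
def pvUpd (o : Option String) (b : Bool) (c : String) : Option String :=
  if o.isSome then o else if b then some c else o

def find_best_columns_alt (df_cols : List String) : Option String × Option String × Option String :=
  let st := df_cols.foldl
    (fun (st : Option String × Option String × Option String × Option String × Option String) c =>
      let n := normalize_colname c
      (pvUpd st.1 (PySem.Str.isIn "DESC" n) c,
       pvUpd st.2.1 (PySem.Str.isIn "MH" n) c,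
       pvUpd st.2.2.1 (PySem.Str.isIn "W/O" n && PySem.Str.isIn "REFER" n) c,
       pvUpd st.2.2.2.1 (PySem.Str.isIn "REFER" n) c,
       pvUpd st.2.2.2.2 (PySem.Str.isIn "W/O" n || PySem.Str.isIn "WO" n) c))
    (none, none, none, none, none)
  let ref := match st.2.2.1 with
    | some x => some x
    | none => match st.2.2.2.1 with
      | some x => some x
      | none => st.2.2.2.2
  (st.1, st.2.1, ref)

-- ===== PRECONDITION & SPEC =====
def Spec_find_best_columns (df_cols : List String) (out : Option String × Option String × Option String) : Prop := out = find_best_columns_alt df_cols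
instance (df_cols : List String) (out : Option String × Option String × Option String) : Decidable (Spec_find_best_columns df_cols out) := by unfold Spec_find_best_columns; infer_instance

-- ===== CLAIM (what is proved, stated in full; the proofs are below) =====
def Claim_equal_find_best_columns : Prop := ∀ (df_cols : List String), Dom_find_best_columns df_cols → Spec_find_best_columns df_cols (find_best_columns df_cols)

-- ===== LEMMAS AND PROOFS =====

-- each first-seen slot of the fold computes (orElse of its start with) find? of its predicate
theorem pvUpd_foldl (p : String → Bool) : ∀ (l : List String) (o : Option String),
    l.foldl (fun o c => pvUpd o (p c) c) o
      = (match o with | some x => some x | none => l.find? p) := by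
  intro l
  induction l with
  | nil => intro o; cases o <;> rfl
  | cons hd tl ih =>
    intro o
    cases o with
    | some x => simpa [List.foldl_cons, pvUpd] using ih (some x)
    | none =>
      by_cases h : p hd = true
      · simpa [List.foldl_cons, pvUpd, h, List.find?] using ih (some hd)
      · simpa [List.foldl_cons, pvUpd, h, List.find?] using ih none

-- the product fold splits into five independent slot folds
theorem pvFold_split (p1 p2 p3 p4 p5 : String → Bool) : ∀ (l : List String)
    (a b c d e : Option String),
    l.foldl (fun (st : Option String × Option String × Option String × Option String × Option String) x =>
        (pvUpd st.1 (p1 x) x, pvUpd st.2.1 (p2 x) x, pvUpd st.2.2.1 (p3 x) x,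
         pvUpd st.2.2.2.1 (p4 x) x, pvUpd st.2.2.2.2 (p5 x) x)) (a, b, c, d, e)
      = (l.foldl (fun o x => pvUpd o (p1 x) x) a,
         l.foldl (fun o x => pvUpd o (p2 x) x) b,
         l.foldl (fun o x => pvUpd o (p3 x) x) c,
         l.foldl (fun o x => pvUpd o (p4 x) x) d,
         l.foldl (fun o x => pvUpd o (p5 x) x) e) := by
  intro l
  induction l with
  | nil => intro a b c d e; rfl
  | cons hd tl ih => intro a b c d e; simp [List.foldl_cons, ih]

-- ===== VERDICT (by name: the statement is the Claim_ definition above) =====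
theorem find_best_columns_spec : Claim_equal_find_best_columns := by
  intro df_cols _
  unfold Spec_find_best_columns find_best_columns find_best_columns_alt
  rw [pvFold_split]
  simp only [pvUpd_foldl]
  generalize List.find? (fun c => PySem.Str.isIn "W/O" (normalize_colname c) && PySem.Str.isIn "REFER" (normalize_colname c)) df_cols = r3
  generalize List.find? (fun c => PySem.Str.isIn "REFER" (normalize_colname c)) df_cols = r4
  cases r3 <;> cases r4 <;> rfl
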